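-- pv_equiv track=rewrite | github.com/V2LLAIN/Capstone | VAS_1.1/src/darknet.py | isGap
-- ===== SOURCE A (Python) =====
-- def isGap(detections):
--     cont_back_flag = False
--     cont_center_flag = False
--     for det in detections:
--         labelId = str(det[0])
--         if( labelId == 'Cont_center' ):
--             cont_center_flag = True
--         elif ( labelId == 'Cont_back'):
--             cont_back_flag = True
--
--     if cont_center_flag == True and cont_back_flag == False:
--         return True
--     return False
-- ===== SOURCE B (Python) =====
-- def isGap(detections):
--     # Pass 1: any 'Cont_back' label rejects immediately.
--     for det in detections:
--         if str(det[0]) == 'Cont_back':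
--             return False
--     # Pass 2: accept at the first 'Cont_center' label.
--     for det in detections:
--         if str(det[0]) == 'Cont_center':
--             return True
--     return False
-- ===== Notes on version B (the rewrite author's own statement) =====
-- stated objective: alternative
-- what changed: Replaces A's single pass maintaining two boolean flags with two staged early-exit scans: the first returns False at the first 'Cont_back', the second returns True at the first 'Cont_center'.
import Mathlib
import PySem

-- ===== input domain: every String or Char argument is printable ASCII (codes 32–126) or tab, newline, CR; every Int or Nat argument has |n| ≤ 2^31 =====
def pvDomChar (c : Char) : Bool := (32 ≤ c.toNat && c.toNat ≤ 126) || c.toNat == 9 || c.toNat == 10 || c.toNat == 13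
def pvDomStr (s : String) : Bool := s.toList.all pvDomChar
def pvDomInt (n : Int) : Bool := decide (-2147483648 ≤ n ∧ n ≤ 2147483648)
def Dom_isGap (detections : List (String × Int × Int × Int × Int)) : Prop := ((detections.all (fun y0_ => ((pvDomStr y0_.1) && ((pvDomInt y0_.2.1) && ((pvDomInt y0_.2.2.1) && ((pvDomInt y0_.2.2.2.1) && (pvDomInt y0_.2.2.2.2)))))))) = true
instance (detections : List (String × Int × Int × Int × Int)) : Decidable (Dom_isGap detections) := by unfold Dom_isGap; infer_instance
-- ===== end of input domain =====

-- B replaces A's single pass with two flags by two staged early-exit scans (alternative decomposition; same cost).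


-- ===== PORT A =====
-- state = (cont_back_flag, cont_center_flag); str(det[0]) on a str is the identity
def isGapStep (st : Bool × Bool) (det : String × Int × Int × Int × Int) : Bool × Bool :=
  let labelId := det.1
  if labelId == "Cont_center" then (st.1, true)
  else if labelId == "Cont_back" then (true, st.2)
  else st

def isGap (detections : List (String × Int × Int × Int × Int)) : Bool :=
  let flags := detections.foldl isGapStep (false, false)
  if flags.2 == true && flags.1 == false then true else false

-- ===== PORT B =====
-- pass 1: early-exit scan returning false at the first 'Cont_back'; none = fell through the loop
def isGapPass1 (l : List (String × Int × Int × Int × Int)) : Option Bool :=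
  match l with
  | [] => none
  | det :: t => if det.1 == "Cont_back" then some false else isGapPass1 t

-- pass 2: early-exit scan returning true at the first 'Cont_center'
def isGapPass2 (l : List (String × Int × Int × Int × Int)) : Bool :=
  match l with
  | [] => false
  | det :: t => if det.1 == "Cont_center" then true else isGapPass2 t

def isGap_alt (detections : List (String × Int × Int × Int × Int)) : Bool :=
  match isGapPass1 detections with
  | some b => b
  | none => isGapPass2 detections

-- ===== PRECONDITION & SPEC =====
def Spec_isGap (detections : List (String × Int × Int × Int × Int)) (out : Bool) : Prop := out = isGap_alt detections
instance (detections : List (String × Int × Int × Int × Int)) (out : Bool) : Decidable (Spec_isGap detections out) := by unfold Spec_isGap; infer_instance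

-- ===== CLAIM =====
def Claim_equal_isGap : Prop := ∀ (detections : List (String × Int × Int × Int × Int)), Dom_isGap detections → Spec_isGap detections (isGap detections)

-- ===== LEMMAS AND PROOFS =====
-- A's loop computes exactly the two membership facts.
theorem isGap_loop (l : List (String × Int × Int × Int × Int)) (b c : Bool) :
    l.foldl isGapStep (b, c)
    = (b || l.any (fun det => det.1 == "Cont_back"),
       c || l.any (fun det => det.1 == "Cont_center")) := by
  induction l generalizing b c with
  | nil => simp
  | cons d t ih =>
    simp only [List.foldl_cons, List.any_cons]
    by_cases h : d.1 = "Cont_center"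
    · simp [isGapStep, h, ih]
    · by_cases h2 : d.1 = "Cont_back"
      · simp [isGapStep, h2, ih]
      · have hb : (d.1 == "Cont_back") = false := beq_eq_false_iff_ne.mpr h2
        have hcc : (d.1 == "Cont_center") = false := beq_eq_false_iff_ne.mpr h
        simp [isGapStep, ih, hb, hcc]

-- B's first pass returns `some false` exactly when a 'Cont_back' label occurs.
theorem isGapPass1_pos (l : List (String × Int × Int × Int × Int))
    (hl : l.any (fun det => det.1 == "Cont_back") = true) : isGapPass1 l = some false := by
  induction l with
  | nil => simp at hl
  | cons d t ih =>
    by_cases h : d.1 = "Cont_back"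
    · simp [isGapPass1, h]
    · simp only [List.any_cons, beq_eq_false_iff_ne.mpr h, Bool.false_or] at hl
      simp [isGapPass1, beq_eq_false_iff_ne.mpr h, ih hl]

theorem isGapPass1_neg (l : List (String × Int × Int × Int × Int))
    (hl : l.any (fun det => det.1 == "Cont_back") = false) : isGapPass1 l = none := by
  induction l with
  | nil => rfl
  | cons d t ih =>
    simp only [List.any_cons, Bool.or_eq_false_iff] at hl
    simp [isGapPass1, hl.1, ih hl.2]

-- B's second pass decides whether a 'Cont_center' label occurs.
theorem isGapPass2_eq (l : List (String × Int × Int × Int × Int)) :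
    isGapPass2 l = l.any (fun det => det.1 == "Cont_center") := by
  induction l with
  | nil => rfl
  | cons d t ih =>
    simp only [isGapPass2, List.any_cons, ih]
    by_cases h : d.1 = "Cont_center"
    · simp [h]
    · simp [beq_eq_false_iff_ne.mpr h, h]

-- ===== VERDICT =====
theorem isGap_spec : Claim_equal_isGap := by
  intro detections _
  show isGap detections = isGap_alt detections
  simp only [isGap, isGap_alt, isGap_loop]
  cases hb : detections.any (fun det => det.1 == "Cont_back") with
  | true =>
    rw [isGapPass1_pos detections hb]
    cases detections.any (fun det => det.1 == "Cont_center") <;> simp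
  | false =>
    rw [isGapPass1_neg detections hb, isGapPass2_eq]
    cases detections.any (fun det => det.1 == "Cont_center") <;> simp
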